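-- pv_equiv track=rewrite | github.com/calclark/PyMidiMind | midimind/model/model.py | gen_motif_dict
-- ===== SOURCE A (Python) =====
-- from typing import List, Dict
--
-- def gen_motif_dict(symbols: List):
--     motifs = {}
--     motif_buffer = []
--     for symbol in symbols:
--         motif_buffer.append(symbol)
--         curr_motif = tuple(motif_buffer)
--         if curr_motif in motifs:
--             motifs[curr_motif] += 1
--         else:
--             motifs[curr_motif] = 1
--             motif_buffer.clear()
--     return motifs
-- ===== SOURCE B (Python) =====
-- def gen_motif_dict(symbols):
--     # LZ78 trie over (node_id, symbol) edges: descend one symbol per step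
--     # instead of re-building the whole growing tuple each step.
--     child = {}          # (node_id, symbol) -> child node id
--     counts = [0]        # counts[node_id]; node 0 is the root (empty motif)
--     paths = [()]        # paths[node_id]: the motif tuple of this node
--     curr = 0
--     for s in symbols:
--         nxt = child.get((curr, s))
--         if nxt is not None:
--             counts[nxt] += 1
--             curr = nxt
--         else:
--             nid = len(counts)
--             child[(curr, s)] = nid
--             counts.append(1)
--             paths.append(paths[curr] + (s,))
--             curr = 0
--     return {paths[i]: counts[i] for i in range(1, len(counts))}
-- ===== Notes on version B (the rewrite author's own statement) =====
-- stated objective: alternative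
-- what changed: Replaces the dict keyed by whole growing motif tuples (re-built and re-hashed each step) with an LZ78 trie kept as a flat (node,symbol)->child edge map plus a current-node pointer, descending one symbol per step and emitting {path: count} in node-creation order.
import Mathlib
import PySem

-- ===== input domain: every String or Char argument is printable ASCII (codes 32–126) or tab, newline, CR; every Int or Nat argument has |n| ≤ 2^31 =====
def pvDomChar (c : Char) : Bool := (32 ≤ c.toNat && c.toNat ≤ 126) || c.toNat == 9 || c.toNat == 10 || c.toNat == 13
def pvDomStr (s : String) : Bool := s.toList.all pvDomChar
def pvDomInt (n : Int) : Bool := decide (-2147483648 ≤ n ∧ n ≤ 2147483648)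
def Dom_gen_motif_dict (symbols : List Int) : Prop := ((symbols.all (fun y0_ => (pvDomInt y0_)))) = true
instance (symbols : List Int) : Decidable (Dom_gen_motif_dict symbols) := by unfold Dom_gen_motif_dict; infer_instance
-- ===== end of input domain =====

-- B replaces the dict keyed by whole growing tuples with a trie ((node, symbol) edge map
-- + current-node pointer), descending one symbol per step; same return value, alternative structure.

-- ===== PORT A =====
def motifStep (st : PySem.Dict (List Int) Int × List Int) (symbol : Int) :
    PySem.Dict (List Int) Int × List Int :=
  let buf := st.2 ++ [symbol]
  if st.1.contains buf then (st.1.insert buf (st.1.getD buf 0 + 1), buf)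
  else (st.1.insert buf 1, [])

def gen_motif_dict (symbols : List Int) : List (List Int × Int) :=
  (symbols.foldl motifStep (PySem.Dict.empty, [])).1.items

-- ===== PORT B =====
-- trie state: (child : edges (node,symbol) ↦ node, counts per node, path per node, current node)
def trieStep (st : PySem.Dict (Nat × Int) Nat × List Int × List (List Int) × Nat) (s : Int) :
    PySem.Dict (Nat × Int) Nat × List Int × List (List Int) × Nat :=
  match st.1.get? (st.2.2.2, s) with
  | some nxt => (st.1, st.2.1.set nxt (st.2.1.getD nxt 0 + 1), st.2.2.1, nxt)
  | none =>
      (st.1.insert (st.2.2.2, s) st.2.1.length, st.2.1 ++ [1],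
       st.2.2.1 ++ [st.2.2.1.getD st.2.2.2 [] ++ [s]], 0)

def gen_motif_dict_alt (symbols : List Int) : List (List Int × Int) :=
  let st := symbols.foldl trieStep (PySem.Dict.empty, [0], [[]], 0)
  -- {paths[i]: counts[i] for i in range(1, len(counts))}
  ((List.range' 1 (st.2.1.length - 1)).foldl
      (fun d i => d.insert (st.2.2.1.getD i []) (st.2.1.getD i 0)) PySem.Dict.empty).items

-- ===== PRECONDITION & SPEC =====
def Spec_gen_motif_dict (symbols : List Int) (out : List (List Int × Int)) : Prop := out = gen_motif_dict_alt symbols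
instance (symbols : List Int) (out : List (List Int × Int)) : Decidable (Spec_gen_motif_dict symbols out) := by unfold Spec_gen_motif_dict; infer_instance

-- ===== CLAIM (what is proved, stated in full; the proofs are below) =====
def Claim_equal_gen_motif_dict : Prop := ∀ (symbols : List Int), Dom_gen_motif_dict symbols → Spec_gen_motif_dict symbols (gen_motif_dict symbols)

-- ===== LEMMAS AND PROOFS =====

/-- The coupling invariant between A's state (motif dict, buffer) and B's trie state. -/
def MotifInv (a : PySem.Dict (List Int) Int × List Int)
    (b : PySem.Dict (Nat × Int) Nat × List Int × List (List Int) × Nat) : Prop :=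
  b.2.2.1.length = b.2.1.length ∧ 0 < b.2.1.length ∧ b.2.2.2 < b.2.1.length ∧
  a.2 = b.2.2.1.getD b.2.2.2 [] ∧ b.2.2.1.getD 0 [] = [] ∧
  a.1.items = (List.range' 1 (b.2.1.length - 1)).map
      (fun i => (b.2.2.1.getD i [], b.2.1.getD i 0)) ∧
  (∀ i s j, b.1.get? (i, s) = some j → i < b.2.1.length ∧ j ≠ 0 ∧ j < b.2.1.length ∧
      b.2.2.1.getD j [] = b.2.2.1.getD i [] ++ [s]) ∧
  (∀ i j s, i < b.2.1.length → j ≠ 0 → j < b.2.1.length →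
      b.2.2.1.getD j [] = b.2.2.1.getD i [] ++ [s] → (b.1.get? (i, s)).isSome) ∧
  (∀ j k, j < b.2.1.length → k < b.2.1.length → j ≠ k →
      b.2.2.1.getD j [] ≠ b.2.2.1.getD k []) ∧
  (∀ j, j ≠ 0 → j < b.2.1.length → b.2.2.1.getD j [] ≠ []) ∧
  (∀ j, j ≠ 0 → j < b.2.1.length → ∃ p s', p < b.2.1.length ∧
      b.2.2.1.getD j [] = b.2.2.1.getD p [] ++ [s'])

lemma getD_concat_length {α : Type} (l : List α) (x d : α) : (l ++ [x]).getD l.length d = x := by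
  simp [List.getD_eq_getElem?_getD]

lemma getD_set_ne {α : Type} (l : List α) (j i : Nat) (w d : α) (h : i ≠ j) :
    (l.set j w).getD i d = l.getD i d := by
  simp only [List.getD_eq_getElem?_getD]
  rw [List.getElem?_set]; simp [Ne.symm h]

lemma getD_set_self {α : Type} (l : List α) (j : Nat) (w d : α) (h : j < l.length) :
    (l.set j w).getD j d = w := by
  simp [List.getD_eq_getElem?_getD, h]

lemma step_inv (a : PySem.Dict (List Int) Int × List Int)
    (b : PySem.Dict (Nat × Int) Nat × List Int × List (List Int) × Nat) (sym : Int)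
    (h : MotifInv a b) : MotifInv (motifStep a sym) (trieStep b sym) := by
  obtain ⟨m, buf⟩ := a
  obtain ⟨child, counts, paths, curr⟩ := b
  obtain ⟨hlen, hpos, hcurr, hbuf, hroot, hitems, hsound, hcomp, hdist, hne, hpre⟩ := h
  simp only at hlen hpos hcurr hbuf hroot hitems hsound hcomp hdist hne hpre
  have hkeys : m.keys = (List.range' 1 (counts.length - 1)).map (fun i => paths.getD i []) := by
    show m.items.map (·.1) = _
    rw [hitems, List.map_map]; rfl
  have hnodup : m.keys.Nodup := by
    rw [hkeys]
    apply List.Nodup.map_on ?_ List.nodup_range'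
    intro x hx y hy hxy
    by_contra hne2
    obtain ⟨hx1, hx2⟩ := List.mem_range'_1.mp hx
    obtain ⟨hy1, hy2⟩ := List.mem_range'_1.mp hy
    exact hdist x y (by omega) (by omega) hne2 hxy
  have hconn : ∀ key, m.contains key = true ↔
      ∃ j, j ≠ 0 ∧ j < counts.length ∧ paths.getD j [] = key := by
    intro key
    rw [PySem.Dict.contains_iff_mem_keys, hkeys, List.mem_map]
    constructor
    · rintro ⟨i, hi, hik⟩
      obtain ⟨h1, h2⟩ := List.mem_range'_1.mp hi
      exact ⟨i, by omega, by omega, hik⟩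
    · rintro ⟨j, hj0, hjn, hjk⟩
      exact ⟨j, List.mem_range'_1.mpr ⟨by omega, by omega⟩, hjk⟩
  cases hc : child.get? (curr, sym) with
  | some j =>
    obtain ⟨-, hj0, hjn, hjp⟩ := hsound curr sym j hc
    have hkey : paths.getD j [] = buf ++ [sym] := by rw [hjp, hbuf]
    have hcont : m.contains (buf ++ [sym]) = true := (hconn _).2 ⟨j, hj0, hjn, hkey⟩
    have hmem : (buf ++ [sym], counts.getD j 0) ∈ m.items := by
      rw [hitems]
      exact List.mem_map.mpr ⟨j, List.mem_range'_1.mpr ⟨by omega, by omega⟩, by rw [hkey]⟩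
    have hval : m.getD (buf ++ [sym]) 0 = counts.getD j 0 :=
      PySem.Dict.getD_of_mem_items m hmem hnodup 0
    have hA : motifStep (m, buf) sym =
        (m.insert (buf ++ [sym]) (counts.getD j 0 + 1), buf ++ [sym]) := by
      simp [motifStep, hcont, hval]
    have hB : trieStep (child, counts, paths, curr) sym =
        (child, counts.set j (counts.getD j 0 + 1), paths, j) := by
      simp [trieStep, hc]
    rw [hA, hB]
    refine ⟨by simpa using hlen, by simpa using hpos, by simpa using hjn, hkey.symm, hroot, ?_, ?_, ?_, ?_, ?_, ?_⟩
    · -- items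
      show (m.insert (buf ++ [sym]) (counts.getD j 0 + 1)).items = _
      rw [PySem.Dict.items_insert_of_contains m _ hcont, hitems, List.map_map]
      simp only [List.length_set]
      apply List.map_congr_left
      intro i hi
      obtain ⟨hi1, hi2⟩ := List.mem_range'_1.mp hi
      by_cases hij : i = j
      · have h1 : (counts.set j (counts.getD j 0 + 1)).getD i 0 = counts.getD j 0 + 1 := by
          rw [hij]; exact getD_set_self _ _ _ _ (by omega)
        have h2 : paths.getD i [] = buf ++ [sym] := by rw [hij]; exact hkey
        simp only [Function.comp_apply, beq_iff_eq, h2, h1]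
        simp
      · have h1 : (counts.set j (counts.getD j 0 + 1)).getD i 0 = counts.getD i 0 :=
          getD_set_ne _ _ _ _ _ hij
        have hdiff : paths.getD i [] ≠ buf ++ [sym] := by
          rw [← hkey]; exact hdist i j (by omega) hjn hij
        simp only [Function.comp_apply, beq_iff_eq, h1]
        rw [if_neg hdiff]
    · -- sound
      intro i s j' hj'
      simp only [List.length_set]
      exact hsound i s j' hj'
    · -- complete
      intro i j' s hi hj0' hjn' heq
      simp only [List.length_set] at hi hjn'
      exact hcomp i j' s hi hj0' hjn' heq
    · -- distinct
      intro j' k hj' hk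
      simp only [List.length_set] at hj' hk
      exact hdist j' k hj' hk
    · -- nonempty
      intro j' hj0' hjn'
      simp only [List.length_set] at hjn'
      exact hne j' hj0' hjn'
    · -- prefix closure
      intro j' hj0' hjn'
      simp only [List.length_set] at hjn' ⊢
      exact hpre j' hj0' hjn'
  | none =>
    have hncont : m.contains (buf ++ [sym]) = false := by
      by_contra hcc
      have : m.contains (buf ++ [sym]) = true := by
        cases hx : m.contains (buf ++ [sym]) with
        | true => rfl
        | false => exact absurd hx hcc
      obtain ⟨j, hj0, hjn, hjk⟩ := (hconn _).1 this
      have := hcomp curr j sym hcurr hj0 hjn (by rw [hjk, hbuf])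
      rw [hc] at this
      simp at this
    have hA : motifStep (m, buf) sym = (m.insert (buf ++ [sym]) 1, []) := by
      simp [motifStep, hncont]
    have hB : trieStep (child, counts, paths, curr) sym =
        (child.insert (curr, sym) counts.length, counts ++ [1],
         paths ++ [buf ++ [sym]], 0) := by
      simp only [trieStep, hc]
      rw [← hbuf]
    rw [hA, hB]
    have hplen : paths.length = counts.length := hlen
    have hkeyne : buf ++ [sym] ≠ ([] : List Int) := by simp
    have hgl : ∀ i, i < counts.length → (paths ++ [buf ++ [sym]]).getD i [] = paths.getD i [] := by
      intro i hi
      exact List.getD_append _ _ _ _ (by omega)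
    have hglen : (paths ++ [buf ++ [sym]]).getD counts.length [] = buf ++ [sym] := by
      rw [← hplen]; exact getD_concat_length _ _ _
    have hnotpath : ∀ k, k ≠ 0 → k < counts.length → paths.getD k [] ≠ buf ++ [sym] := by
      intro k hk0 hkn hkey
      rw [(hconn _).2 ⟨k, hk0, hkn, hkey⟩] at hncont
      cases hncont
    refine ⟨by simp [hplen], by simp, by simp, ?_, ?_, ?_, ?_, ?_, ?_, ?_, ?_⟩
    · -- buffer
      show ([] : List Int) = (paths ++ [buf ++ [sym]]).getD 0 []
      rw [hgl 0 (by omega), hroot]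
    · -- root
      show (paths ++ [buf ++ [sym]]).getD 0 [] = []
      rw [hgl 0 (by omega), hroot]
    · -- items
      show (m.insert (buf ++ [sym]) 1).items = _
      rw [PySem.Dict.items_insert_of_not_contains m 1 hncont, hitems]
      simp only [List.length_append, List.length_cons, List.length_nil]
      have : counts.length + 1 - 1 = (counts.length - 1) + 1 := by omega
      rw [this, List.range'_1_concat, List.map_append]
      congr 1
      · apply List.map_congr_left
        intro i hi
        obtain ⟨hi1, hi2⟩ := List.mem_range'_1.mp hi
        rw [hgl i (by omega), List.getD_append _ _ _ _ (by omega)]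
      · simp only [List.map_cons, List.map_nil]
        rw [show 1 + (counts.length - 1) = counts.length by omega]
        rw [hglen, getD_concat_length counts 1 0]
    · -- sound
      intro i s j' hj'
      rw [PySem.Dict.get?_insert] at hj'
      simp only [List.length_append, List.length_cons, List.length_nil]
      split at hj'
      · rename_i heq
        injection heq with h1 h2
        subst h1; subst h2
        have hj'e : counts.length = j' := Option.some.inj hj'
        subst hj'e
        refine ⟨by omega, by omega, by omega, ?_⟩
        rw [hglen, hgl _ hcurr, ← hbuf]
      · rename_i hne2
        obtain ⟨hi, hj0', hjn', hp⟩ := hsound i s j' hj'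
        exact ⟨by omega, hj0', by omega, by rw [hgl j' (by omega), hgl i (by omega)]; exact hp⟩
    · -- complete
      intro i j' s hi hj0' hjn' heq
      simp only [List.length_append, List.length_cons, List.length_nil] at hi hjn'
      rw [PySem.Dict.get?_insert]
      split
      · simp
      · rename_i hne2
        by_cases hin : i = counts.length
        · exfalso
          subst hin
          rw [hglen] at heq
          by_cases hjn2 : j' = counts.length
          · subst hjn2
            rw [hglen] at heq
            have := congrArg List.length heq
            simp at this
          · have hjlt : j' < counts.length := by omega
            rw [hgl j' hjlt] at heq
            obtain ⟨p, s', hp, hpp⟩ := hpre j' hj0' hjlt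
            rw [heq] at hpp
            obtain ⟨hpk, -⟩ := List.append_singleton_inj.mp hpp
            have hp0 : p ≠ 0 := by
              intro hp0; subst hp0
              rw [hroot] at hpk
              exact hkeyne hpk
            exact hnotpath p hp0 hp hpk.symm
        · have hi' : i < counts.length := by omega
          by_cases hjn2 : j' = counts.length
          · exfalso
            subst hjn2
            rw [hglen, hgl i hi'] at heq
            obtain ⟨hpi, hs⟩ := List.append_singleton_inj.mp heq
            have hic : i = curr := by
              by_contra hic
              exact hdist i curr hi' hcurr hic (by rw [← hpi, hbuf])
            exact hne2 (by rw [hic, hs])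
          · have hjlt : j' < counts.length := by omega
            rw [hgl j' hjlt, hgl i hi'] at heq
            exact hcomp i j' s hi' hj0' hjlt heq
    · -- distinct
      intro j' k hj' hk hjk
      simp only [List.length_append, List.length_cons, List.length_nil] at hj' hk
      by_cases hjn2 : j' = counts.length
      · subst hjn2
        rw [hglen]
        have hklt : k < counts.length := by omega
        rw [hgl k hklt]
        by_cases hk0 : k = 0
        · subst hk0; rw [hroot]; exact hkeyne
        · exact fun hh => hnotpath k hk0 hklt hh.symm
      · have hjlt : j' < counts.length := by omega
        rw [hgl j' hjlt]
        by_cases hkn2 : k = counts.length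
        · subst hkn2
          rw [hglen]
          by_cases hj0' : j' = 0
          · subst hj0'; rw [hroot]; exact (Ne.symm hkeyne)
          · exact hnotpath j' hj0' hjlt
        · have hklt : k < counts.length := by omega
          rw [hgl k hklt]
          exact hdist j' k hjlt hklt hjk
    · -- nonempty
      intro j' hj0' hjn'
      simp only [List.length_append, List.length_cons, List.length_nil] at hjn'
      by_cases hjn2 : j' = counts.length
      · subst hjn2; rw [hglen]; exact hkeyne
      · have hjlt : j' < counts.length := by omega
        rw [hgl j' hjlt]
        exact hne j' hj0' hjlt
    · -- prefix closure
      intro j' hj0' hjn'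
      simp only [List.length_append, List.length_cons, List.length_nil] at hjn' ⊢
      by_cases hjn2 : j' = counts.length
      · subst hjn2
        exact ⟨curr, sym, by omega, by rw [hglen, hgl curr hcurr, hbuf]⟩
      · have hjlt : j' < counts.length := by omega
        obtain ⟨p, s', hp, hpp⟩ := hpre j' hj0' hjlt
        exact ⟨p, s', by omega, by rw [hgl j' hjlt, hgl p hp]; exact hpp⟩

lemma fold_inv (l : List Int) (a : PySem.Dict (List Int) Int × List Int)
    (b : PySem.Dict (Nat × Int) Nat × List Int × List (List Int) × Nat)
    (h : MotifInv a b) : MotifInv (l.foldl motifStep a) (l.foldl trieStep b) := by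
  induction l generalizing a b with
  | nil => exact h
  | cons x xs ih => exact ih _ _ (step_inv a b x h)

lemma inv_init : MotifInv (PySem.Dict.empty, ([] : List Int))
    ((PySem.Dict.empty : PySem.Dict (Nat × Int) Nat), [0], [[]], 0) := by
  refine ⟨rfl, by norm_num, by norm_num, rfl, rfl, ?_, ?_, ?_, ?_, ?_, ?_⟩
  · simp [PySem.Dict.empty]
  · intro i s j hj
    rw [PySem.Dict.get?_empty] at hj; cases hj
  · intro i j s _ hj0 hj _; simp at hj; omega
  · intro j k hj hk hjk; simp at hj hk; omega
  · intro j hj0 hj; simp at hj; omega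
  · intro j hj0 hj; simp at hj; omega

-- ===== VERDICT (by name: the statement is the Claim_ definition above) =====
theorem gen_motif_dict_spec : Claim_equal_gen_motif_dict := by
  intro symbols _
  unfold Spec_gen_motif_dict gen_motif_dict gen_motif_dict_alt
  have h := fold_inv symbols _ _ inv_init
  obtain ⟨hlen, hpos, hcurr, hbuf, hroot, hitems, hsound, hcomp, hdist, hne, hpre⟩ := h
  rw [hitems]
  rw [PySem.Dict.items_foldl_insert_fresh _ _ _ _ (by intro a _; exact PySem.Dict.contains_empty _) ?nd]
  case nd =>
    apply List.Nodup.map_on ?_ List.nodup_range'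
    intro x hx y hy hxy
    by_contra hne2
    obtain ⟨hx1, hx2⟩ := List.mem_range'_1.mp hx
    obtain ⟨hy1, hy2⟩ := List.mem_range'_1.mp hy
    exact hdist x y (by omega) (by omega) hne2 hxy
  simp [PySem.Dict.empty]
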